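-- pv_equiv track=rewrite | github.com/PKU-Chengxu/Adonis | octopus/syspath/execution_path.py | perfor_list_product
-- ===== SOURCE A (Python) =====
-- def list_product(a: list, b: list):
--     ret = []
--     for i in a:
--         for j in b:
--             ret.append(i+j)
--     return ret
--
-- def perfor_list_product(ll: list(list())):
--     if len(ll) == 0:
--         return []
--     elif len(ll) == 1:
--         return ll[0]
--     else:
--         ret = ll[0]
--         for i in range(1, len(ll)):
--             ret = list_product(ret, ll[i])
--         return ret
-- ===== SOURCE B (Python) =====
-- from itertools import product
-- from functools import reduce
-- from operator import add
--
-- def perfor_list_product(ll: list):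
--     if len(ll) == 0:
--         return []
--     elif len(ll) == 1:
--         return ll[0]
--     else:
--         return [reduce(add, combo) for combo in product(*ll)]
-- ===== Notes on version B (the rewrite author's own statement) =====
-- stated objective: idiomatic
-- what changed: Replaces the pairwise list_product fold that materialises growing intermediate prefix lists with a single itertools.product sweep that generates every full combination and joins each via reduce(add, ...).
import Mathlib
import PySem

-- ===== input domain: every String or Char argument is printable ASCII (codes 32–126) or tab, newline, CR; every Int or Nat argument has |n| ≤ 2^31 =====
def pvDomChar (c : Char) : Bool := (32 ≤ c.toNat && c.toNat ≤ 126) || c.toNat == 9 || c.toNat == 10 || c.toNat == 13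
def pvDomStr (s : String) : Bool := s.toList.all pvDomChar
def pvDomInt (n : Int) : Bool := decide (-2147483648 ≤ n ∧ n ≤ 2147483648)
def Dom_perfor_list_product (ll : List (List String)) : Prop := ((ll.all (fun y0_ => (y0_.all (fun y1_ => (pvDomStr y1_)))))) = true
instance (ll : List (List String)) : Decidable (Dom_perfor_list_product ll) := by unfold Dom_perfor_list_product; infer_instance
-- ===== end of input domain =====

-- B replaces the pairwise list_product fold (which materialises every prefix's combinations)
-- with a single itertools.product sweep joining each full combination; same values, idiomatic style.

-- ===== PORT A =====
-- def list_product(a, b): nested loops appending i+j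
def list_product (a b : List String) : List String :=
  a.foldl (fun ret i => b.foldl (fun ret j => ret ++ [i ++ j]) ret) []

def perfor_list_product (ll : List (List String)) : List String :=
  if ll.length = 0 then []
  else if ll.length = 1 then ll.headD []
  else
    -- ret = ll[0]; for i in range(1, len(ll)): ret = list_product(ret, ll[i])
    (ll.tail).foldl (fun ret b => list_product ret b) (ll.headD [])

-- ===== PORT B =====
-- itertools.product(*ll): all combinations, last sublist varies fastest
def pyProduct (ll : List (List String)) : List (List String) :=
  match ll with
  | [] => [[]]
  | x :: xs => x.flatMap (fun a => (pyProduct xs).map (fun c => a :: c))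

-- functools.reduce(operator.add, combo): head as initial value, fold + over the rest
def reduceAdd (combo : List String) : String :=
  match combo with
  | [] => ""            -- unreachable: product yields only combos of length len(ll) ≥ 2
  | h :: t => t.foldl (· ++ ·) h

def perfor_list_product_alt (ll : List (List String)) : List String :=
  if ll.length = 0 then []
  else if ll.length = 1 then ll.headD []
  else (pyProduct ll).map reduceAdd

-- ===== PRECONDITION & SPEC =====
def Spec_perfor_list_product (ll : List (List String)) (out : List String) : Prop := out = perfor_list_product_alt ll
instance (ll : List (List String)) (out : List String) : Decidable (Spec_perfor_list_product ll out) := by unfold Spec_perfor_list_product; infer_instance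

-- ===== CLAIM (what is proved, stated in full; the proofs are below) =====
def Claim_equal_perfor_list_product : Prop := ∀ (ll : List (List String)), Dom_perfor_list_product ll → Spec_perfor_list_product ll (perfor_list_product ll)

-- ===== LEMMAS AND PROOFS =====

theorem list_product_eq_flatMap (a b : List String) :
    list_product a b = a.flatMap (fun i => b.map (fun j => i ++ j)) := by
  unfold list_product
  have inner : ∀ (b : List String) (i : String) (acc : List String),
      b.foldl (fun ret j => ret ++ [i ++ j]) acc = acc ++ b.map (fun j => i ++ j) := by
    intro b i
    induction b with
    | nil => simp
    | cons x xs ihx => intro acc; simp [ihx]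
  have outer : ∀ (t : List String) (acc : List String),
      t.foldl (fun ret i => b.foldl (fun ret j => ret ++ [i ++ j]) ret) acc
        = acc ++ t.flatMap (fun i => b.map (fun j => i ++ j)) := by
    intro t
    induction t with
    | nil => simp
    | cons x xs ihx => intro acc; simp [inner, List.flatMap_def]
  simpa using outer a []

theorem foldl_strAppend_shift (c : List String) (x y : String) :
    c.foldl (· ++ ·) (x ++ y) = x ++ c.foldl (· ++ ·) y := by
  induction c generalizing y with
  | nil => rfl
  | cons h t ih => simpa [String.append_assoc] using ih (y ++ h)

theorem foldl_list_product_eq (t : List (List String)) :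
    ∀ (acc : List String),
      t.foldl (fun ret b => list_product ret b) acc
        = acc.flatMap (fun s => (pyProduct t).map (fun c => s ++ c.foldl (· ++ ·) "")) := by
  induction t with
  | nil =>
    intro acc
    simp [pyProduct]
  | cons b t ih =>
    intro acc
    simp only [List.foldl_cons]
    rw [ih, list_product_eq_flatMap]
    simp only [pyProduct, List.flatMap_assoc, List.map_flatMap, List.flatMap_map,
      List.map_map]
    apply List.flatMap_congr
    intro s _
    apply List.flatMap_congr
    intro j _
    apply List.map_congr_left
    intro c _
    have h2 : c.foldl (· ++ ·) j = j ++ c.foldl (· ++ ·) "" := by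
      simpa using foldl_strAppend_shift c j ""
    simp [List.foldl_cons, h2, String.append_assoc]

-- ===== VERDICT (by name: the statement is the Claim_ definition above) =====
theorem perfor_list_product_spec : Claim_equal_perfor_list_product := by
  unfold Claim_equal_perfor_list_product
  intro ll _
  unfold Spec_perfor_list_product perfor_list_product perfor_list_product_alt
  match ll with
  | [] => rfl
  | [x] => rfl
  | h :: b :: t =>
    simp only [List.length_cons, List.tail_cons, List.headD_cons]
    rw [foldl_list_product_eq]
    simp only [pyProduct, List.map_flatMap, List.map_map]
    apply List.flatMap_congr
    intro s _
    apply List.flatMap_congr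
    intro j _
    apply List.map_congr_left
    intro c _
    have h2 : (j :: c).foldl (· ++ ·) s = s ++ (j :: c).foldl (· ++ ·) "" := by
      simpa using foldl_strAppend_shift (j :: c) s ""
    simp only [Function.comp, reduceAdd]
    simp [List.foldl_cons] at h2 ⊢
    simp [h2]
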